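-- pv_equiv track=rewrite | github.com/SuperPichu/adventOfCode | 2017/day4/passphrasesB.py | check
-- ===== SOURCE A (Python) =====
-- from itertools import permutations
--
-- def check(words):
--     for word in words:
--         if words.count(word) > 1:
--             return False
--         perms = set(permutations(word))
--         for p in perms:
--             s = ''
--             for l in p:
--                 s = s + l
--             if s in words and s != word:
--                 return False
--     return True
-- ===== SOURCE B (Python) =====
-- def check(words):
--     seen = set()
--     for word in words:
--         sig = ''.join(sorted(word))
--         if sig in seen:
--             return False
--         seen.add(sig)
--     return True
-- ===== Notes on version B (the rewrite author's own statement) =====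
-- stated objective: faster
-- what changed: Replaces A's per-word enumeration of all letter permutations (checked against the whole list) by a single pass that keeps a set of sorted-letter signatures and fails on the first repeat.
import Mathlib
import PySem

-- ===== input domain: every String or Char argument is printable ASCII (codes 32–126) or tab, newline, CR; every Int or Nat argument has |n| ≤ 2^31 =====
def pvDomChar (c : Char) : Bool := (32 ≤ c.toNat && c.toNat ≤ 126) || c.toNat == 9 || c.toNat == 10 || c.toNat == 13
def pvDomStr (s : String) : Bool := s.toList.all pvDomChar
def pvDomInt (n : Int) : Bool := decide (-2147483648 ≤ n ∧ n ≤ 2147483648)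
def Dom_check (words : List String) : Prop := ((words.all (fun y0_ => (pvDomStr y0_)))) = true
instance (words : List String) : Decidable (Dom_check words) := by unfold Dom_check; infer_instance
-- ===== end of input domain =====

-- B replaces A's per-word permutation enumeration by one pass over a set of sorted-letter
-- signatures (objective: faster — no factorial permutation loop).

-- ===== PORT A =====
-- literal port of A's outer loop; the inner 'for p in perms' builds s char by char and
-- returns False on the first hit, which (the result being a Bool) is List.any.
-- Python's 'perms = set(permutations(word))' is consumed ONLY by that order-independent
-- existential scan, so the any is taken over the permutations list itself: deduplication
-- cannot change an 'any' (a Set.ofList of n! lists is not evaluable in reasonable time)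
def checkLoop (words : List String) : List String → Bool
  | [] => true
  | word :: rest =>
    if PySem.List.count words word > 1 then false
    else
      let perms := PySem.List.permutations word.toList word.toList.length
      if perms.any (fun p =>
          let s := p.foldl (fun acc l => acc ++ [l]) ([] : List Char)
          words.contains (String.ofList s) && String.ofList s != word) then false
      else checkLoop words rest

def check (words : List String) : Bool := checkLoop words words

-- ===== PORT B =====
-- sig = ''.join(sorted(word))
def pvSig (w : String) : String := String.ofList (PySem.List.sorted w.toList (fun c => c))

def checkAltLoop (seen : PySem.Set String) : List String → Bool
  | [] => true
  | word :: rest =>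
    let sig := pvSig word
    if PySem.Set.contains seen sig then false
    else checkAltLoop (PySem.Set.add seen sig) rest

def check_alt (words : List String) : Bool := checkAltLoop PySem.Set.empty words

-- ===== PRECONDITION & SPEC =====
def Spec_check (words : List String) (out : Bool) : Prop := out = check_alt words
instance (words : List String) (out : Bool) : Decidable (Spec_check words out) := by unfold Spec_check; infer_instance

-- ===== CLAIM (what is proved, stated in full; the proofs are below) =====
def Claim_equal_check : Prop := ∀ (words : List String), Dom_check words → Spec_check words (check words)

-- ===== LEMMAS AND PROOFS =====

-- completeness of itertools.permutations: every rearrangement is listed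
lemma mem_perms_of_perm : ∀ (p xs : List Char), p.Perm xs →
    p ∈ PySem.List.permutations xs xs.length := by
  intro p
  induction p with
  | nil =>
    intro xs h
    have hx : xs = [] := h.symm.eq_nil
    subst hx
    simp [PySem.List.permutations_zero]
  | cons x p ih =>
    intro xs h
    have hx : x ∈ xs := h.mem_iff.mp (by simp)
    have hp : p.Perm (xs.erase x) := (List.cons_perm_iff_perm_erase.mp h).2
    have hlen : xs.length = p.length + 1 := by
      have := h.length_eq; simpa using this.symm
    have hidx : xs.idxOf x < xs.length := List.idxOf_lt_length_of_mem hx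
    have hget : xs[xs.idxOf x]? = some x := by
      rw [List.getElem?_eq_getElem hidx]
      exact congrArg some (List.getElem_idxOf hidx)
    have herase : xs.eraseIdx (xs.idxOf x) = xs.erase x := List.eraseIdx_idxOf_eq_erase x xs
    have hlen2 : (xs.erase x).length = p.length := by
      rw [List.length_erase_of_mem hx, hlen]; simp
    rw [hlen, PySem.List.permutations_succ]
    refine List.mem_flatMap.mpr ⟨xs.idxOf x, List.mem_range.mpr hidx, ?_⟩
    rw [hget]
    refine List.mem_map.mpr ⟨p, ?_, rfl⟩
    rw [herase, ← hlen2]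
    exact ih _ hp

lemma sig_eq_iff (a b : String) : pvSig a = pvSig b ↔ a.toList.Perm b.toList := by
  unfold pvSig
  rw [String.ofList_inj]
  exact PySem.List.sorted_id_eq_sorted_id_iff_perm _ _

-- the inner permutation scan of A fires exactly on an anagram of word present elsewhere
lemma innerAny_iff (words : List String) (word : String) :
    ((PySem.List.permutations word.toList word.toList.length).any
      (fun p =>
        let s := p.foldl (fun acc l => acc ++ [l]) ([] : List Char)
        words.contains (String.ofList s) && String.ofList s != word) = true) ↔
    ∃ v ∈ words, v.toList.Perm word.toList ∧ v ≠ word := by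
  rw [List.any_eq_true]
  constructor
  · rintro ⟨p, hp, hcond⟩
    have hperm : p.Perm word.toList :=
      PySem.List.perm_of_mem_permutations hp
    simp only [PySem.List.foldl_append_singleton, List.nil_append, Bool.and_eq_true,
      List.contains_iff_mem, bne_iff_ne] at hcond
    refine ⟨String.ofList p, hcond.1, ?_, hcond.2⟩
    simpa using hperm
  · rintro ⟨v, hv, hperm, hne⟩
    refine ⟨v.toList, mem_perms_of_perm _ _ hperm, ?_⟩
    simp only [PySem.List.foldl_append_singleton, List.nil_append, Bool.and_eq_true,
      List.contains_iff_mem, bne_iff_ne, String.ofList_toList]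
    exact ⟨hv, hne⟩

def QA (words : List String) (w : String) : Prop :=
  words.count w ≤ 1 ∧ ∀ v ∈ words, v.toList.Perm w.toList → v = w

lemma checkLoop_iff (words : List String) (ws : List String) :
    checkLoop words ws = true ↔ ∀ w ∈ ws, QA words w := by
  induction ws with
  | nil => simp [checkLoop]
  | cons word rest ih =>
    rw [checkLoop]
    dsimp only
    split_ifs with h1 h2
    · simp only [false_iff]
      intro hall
      have := (hall word (by simp)).1
      rw [PySem.List.count_eq] at h1
      omega
    · simp only [false_iff]
      intro hall
      obtain ⟨v, hv, hperm, hne⟩ := (innerAny_iff words word).mp h2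
      exact hne ((hall word (by simp)).2 v hv hperm)
    · rw [ih, List.forall_mem_cons, and_iff_right]
      constructor
      · rw [PySem.List.count_eq] at h1; omega
      · intro v hv hperm
        by_contra hne
        exact h2 ((innerAny_iff words word).mpr ⟨v, hv, hperm, hne⟩)

lemma checkAltLoop_iff (seen : PySem.Set String) (ws : List String) :
    checkAltLoop seen ws = true ↔ (ws.map pvSig).Nodup ∧ ∀ w ∈ ws, pvSig w ∉ seen := by
  induction ws generalizing seen with
  | nil => simp [checkAltLoop]
  | cons word rest ih =>
    rw [checkAltLoop]
    split_ifs with h1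
    · simp only [false_iff]
      rintro ⟨-, hall⟩
      exact hall word (by simp) ((PySem.Set.contains_iff _ _).mp h1)
    · rw [ih]
      have hnm : pvSig word ∉ seen := fun hm => h1 ((PySem.Set.contains_iff _ _).mpr hm)
      simp only [List.map_cons, List.nodup_cons, List.forall_mem_cons, List.mem_map,
        PySem.Set.mem_add]
      constructor
      · rintro ⟨hnd, hall⟩
        refine ⟨⟨?_, hnd⟩, hnm, fun v hv => fun h => ((hall v hv) (Or.inl h)).elim⟩
        rintro ⟨v, hv, hveq⟩
        exact hall v hv (Or.inr hveq)
      · rintro ⟨⟨hnotin, hnd⟩, -, hall⟩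
        refine ⟨hnd, fun v hv h => ?_⟩
        rcases h with h | h
        · exact hall v hv h
        · exact hnotin ⟨v, hv, h⟩

lemma bridge (words : List String) :
    (∀ w ∈ words, QA words w) ↔ (words.map pvSig).Nodup := by
  constructor
  · intro h
    have hnd : words.Nodup := by
      rw [List.nodup_iff_count_le_one]
      intro a
      by_cases ha : a ∈ words
      · exact (h a ha).1
      · simp [List.count_eq_zero_of_not_mem ha]
    refine List.Nodup.map_on ?_ hnd
    intro x hx y hy hxy
    exact (h y hy).2 x hx ((sig_eq_iff x y).mp hxy)
  · intro h w hw
    refine ⟨List.nodup_iff_count_le_one.mp (h.of_map _) w, fun v hv hperm => ?_⟩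
    exact List.inj_on_of_nodup_map h hv hw ((sig_eq_iff v w).mpr hperm)

-- ===== VERDICT (by name: the statement is the Claim_ definition above) =====
theorem check_spec : Claim_equal_check := by
  intro words _
  unfold Spec_check check check_alt
  rw [Bool.eq_iff_iff, checkLoop_iff, checkAltLoop_iff, bridge]
  simp [PySem.Set.empty]
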